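-- pv_equiv track=rewrite | github.com/ShashankAthreya/CodilitySolutions | Dominator.py | solution
-- ===== SOURCE A (Python) =====
-- from collections import Counter
--
-- def solution(A):
--     if not A: return -1
--     n = len(A)
--     if n < 2: return 0
--     data = Counter(A)
--     max_occurences = max(list(data.values()))
--     if max_occurences <= (n//2): return -1
--     mode = [x for x in data if data[x] == max_occurences][0]
--     return A.index(mode)
-- ===== SOURCE B (Python) =====
-- def solution(A):
--     if not A:
--         return -1
--     candidate = A[0]
--     count = 0
--     for y in A:
--         if count == 0:
--             candidate = y
--             count = 1
--         elif y == candidate: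
--             count += 1
--         else:
--             count -= 1
--     if A.count(candidate) > len(A) // 2:
--         return A.index(candidate)
--     return -1
-- ===== Notes on version B (the rewrite author's own statement) =====
-- stated objective: faster
-- what changed: Replaced the Counter/max/comprehension pipeline with Boyer-Moore majority voting: one pass maintaining a candidate and a counter, then one verification count, no hash map or extra lists.
import Mathlib
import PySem

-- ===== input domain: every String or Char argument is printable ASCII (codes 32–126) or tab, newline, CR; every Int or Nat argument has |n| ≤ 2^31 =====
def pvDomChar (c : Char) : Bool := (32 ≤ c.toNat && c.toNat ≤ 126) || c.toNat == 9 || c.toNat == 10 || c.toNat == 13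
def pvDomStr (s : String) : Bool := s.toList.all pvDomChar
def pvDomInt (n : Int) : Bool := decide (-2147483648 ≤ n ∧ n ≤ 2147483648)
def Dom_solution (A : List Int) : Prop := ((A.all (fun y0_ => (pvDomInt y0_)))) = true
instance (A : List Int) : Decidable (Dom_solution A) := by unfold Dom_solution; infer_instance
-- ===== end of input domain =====

-- B replaces the Counter/max/comprehension pipeline with Boyer-Moore majority voting (O(1) extra space).

-- ===== PORT A =====
def solution (A : List Int) : Int :=
  if A = [] then -1
  else
    let n : Int := A.length
    if n < 2 then 0
    else
      let data := PySem.Dict.counter A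
      match PySem.List.max? data.values (fun v => v) with
      | none => -1  -- unreachable: data is nonempty since A is nonempty (Python: max([]) would raise)
      | some maxOccurences =>
        if maxOccurences ≤ PySem.Int.floordiv n 2 then -1
        else
          match data.keys.filter (fun x => data.getD x 0 == maxOccurences) with
          | [] => -1  -- unreachable: the comprehension is nonempty (Python: [][0] would raise)
          | mode :: _ =>
            match PySem.List.index? A mode with
            | some i => (i : Int)
            | none => -1  -- unreachable: mode ∈ A (Python: .index would raise)

-- ===== PORT B =====
-- one Boyer-Moore voting step on the state (candidate, count)
def bmStep (s : Int × Int) (y : Int) : Int × Int :=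
  if s.2 = 0 then (y, 1)
  else if y = s.1 then (s.1, s.2 + 1)
  else (s.1, s.2 - 1)

def solution_alt (A : List Int) : Int :=
  match A with
  | [] => -1
  | a :: _ =>
    let st := A.foldl bmStep (a, 0)
    let cand := st.1
    if PySem.Int.floordiv (A.length : Int) 2 < (A.count cand : Int) then
      match PySem.List.index? A cand with
      | some i => (i : Int)
      | none => -1  -- unreachable: cand ∈ A since its count is positive
    else -1

-- ===== PRECONDITION & SPEC =====
def Spec_solution (A : List Int) (out : Int) : Prop := out = solution_alt A
instance (A : List Int) (out : Int) : Decidable (Spec_solution A out) := by unfold Spec_solution; infer_instance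

-- ===== CLAIM (what is proved, stated in full; the proofs are below) =====
def Claim_equal_solution : Prop := ∀ (A : List Int), Dom_solution A → Spec_solution A (solution A)

-- ===== LEMMAS AND PROOFS =====

-- two distinct values cannot together account for more than all positions
theorem count_add_count_le (xs : List Int) (x y : Int) (hxy : x ≠ y) :
    xs.count x + xs.count y ≤ xs.length := by
  induction xs with
  | nil => simp
  | cons a t ih =>
    simp only [List.count_cons, List.length_cons]
    by_cases hax : a = x <;> by_cases hay : a = y <;> simp_all <;> omega

-- Boyer-Moore invariant: the final count is nonnegative, and any value other than the final
-- candidate occupies at most half of the processed positions (up to the potential of the states)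
theorem bm_invariant (xs : List Int) (c k : Int) (hk : 0 ≤ k) (x : Int) :
    0 ≤ (xs.foldl bmStep (c, k)).2 ∧
    2 * (xs.count x : Int) + (if x = c then k else -k) ≤
      (xs.length : Int) + (if x = (xs.foldl bmStep (c, k)).1 then (xs.foldl bmStep (c, k)).2
                           else -(xs.foldl bmStep (c, k)).2) := by
  induction xs generalizing c k with
  | nil =>
    simp only [List.foldl_nil, List.count_nil, List.length_nil]
    refine ⟨hk, ?_⟩
    split <;> push_cast <;> omega
  | cons y t ih =>
    simp only [List.foldl_cons, List.count_cons, List.length_cons]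
    by_cases hk0 : k = 0
    · have h := ih y 1 (by omega)
      simp only [bmStep, hk0] at h ⊢
      norm_num at h ⊢
      -- (normalize the k = 0 state)
      rcases h with ⟨h1, h2⟩
      refine ⟨h1, ?_⟩
      split_ifs at h2 ⊢ <;> omega
    · by_cases hyc : y = c
      · have h := ih c (k + 1) (by omega)
        simp only [bmStep, if_neg hk0, if_pos hyc] at h ⊢
        rcases h with ⟨h1, h2⟩
        refine ⟨h1, ?_⟩
        push_cast at h2 ⊢
        simp only [beq_iff_eq]
        split_ifs at h2 ⊢ <;> omega
      · have h := ih c (k - 1) (by omega)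
        simp only [bmStep, if_neg hk0, if_neg hyc] at h ⊢
        rcases h with ⟨h1, h2⟩
        refine ⟨h1, ?_⟩
        push_cast at h2 ⊢
        simp only [beq_iff_eq]
        split_ifs at h2 ⊢ <;> omega

-- consequence: a value that strictly dominates the list is the final Boyer-Moore candidate
theorem bm_majority (xs : List Int) (c₀ : Int) (d : Int)
    (hd : (xs.length : Int) < 2 * (xs.count d : Int)) :
    (xs.foldl bmStep (c₀, 0)).1 = d := by
  by_contra hne
  have h := bm_invariant xs c₀ 0 le_rfl d
  rcases h with ⟨h1, h2⟩
  split_ifs at h2 <;> omega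

-- the first element of a filter is d when d is in the list and only d satisfies the predicate
theorem filter_head_unique (p : Int → Bool) (d : Int) :
    ∀ (l : List Int), d ∈ l → (∀ x ∈ l, (p x = true ↔ x = d)) →
      ∃ t, l.filter p = d :: t := by
  intro l
  induction l with
  | nil => simp
  | cons a t ih =>
    intro hmem hp
    by_cases had : a = d
    · subst had
      have : p a = true := (hp a (by simp)).mpr rfl
      exact ⟨t.filter p, by simp [this]⟩
    · have hpa : p a = false := by
        by_contra h
        exact had ((hp a (by simp)).mp (by simpa using h))
      have hdt : d ∈ t := by
        rcases List.mem_cons.mp hmem with h | h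
        · exact absurd h.symm had
        · exact h
      obtain ⟨t', ht'⟩ := ih hdt (fun x hx => hp x (by simp [hx]))
      exact ⟨t', by simp [hpa, ht']⟩

-- a value other than the dominator occurs strictly less often
theorem count_lt_of_dominator (A : List Int) (d x : Int) (hd : (A.length : Int) < 2 * (A.count d : Int))
    (hx : x ≠ d) : A.count x < A.count d := by
  have h := count_add_count_le A x d hx
  omega

-- B's value when a dominator exists
theorem alt_of_dominator (A : List Int) (a : Int) (t : List Int) (hA : A = a :: t)
    (d : Int) (hd : (A.length : Int) < 2 * (A.count d : Int)) :
    solution_alt A = (match PySem.List.index? A d with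
                      | some i => (i : Int)
                      | none => -1) := by
  subst hA
  have hcand : ((a :: t).foldl bmStep (a, 0)).1 = d := bm_majority (a :: t) a d hd
  have hfd : PySem.Int.floordiv ((a :: t).length : Int) 2 = ((a :: t).length : Int) / 2 :=
    PySem.Int.floordiv_eq_ediv_of_pos (by omega)
  simp only [solution_alt, hcand, hfd]
  rw [if_pos (by omega)]

-- B's value when no dominator exists
theorem alt_of_no_dominator (A : List Int)
    (hnd : ∀ x, (A.length : Int) < 2 * (A.count x : Int) → False) :
    solution_alt A = -1 := by
  cases A with
  | nil => rfl
  | cons a t =>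
    have hfd : PySem.Int.floordiv ((a :: t).length : Int) 2 = ((a :: t).length : Int) / 2 :=
      PySem.Int.floordiv_eq_ediv_of_pos (by omega)
    simp only [solution_alt, hfd]
    rw [if_neg]
    have h2 : ¬ (((a :: t).length : Int) <
        2 * (((a :: t).count ((a :: t).foldl bmStep (a, 0)).1 : Nat) : Int)) :=
      fun h => hnd _ h
    omega

-- the values list of Counter(A) is the per-distinct-element count list
theorem counter_values (A : List Int) :
    (PySem.Dict.counter A).values = (PySem.Set.ofList A).map (fun k => ((A.count k : Nat) : Int)) := by
  simp [PySem.Dict.values, PySem.Dict.items_counter, List.map_map, Function.comp]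

-- A's value when a dominator exists and len(A) ≥ 2
theorem sol_of_dominator (A : List Int) (hlen : 2 ≤ A.length)
    (d : Int) (hdA : d ∈ A) (hd : (A.length : Int) < 2 * (A.count d : Int)) :
    solution A = (match PySem.List.index? A d with
                  | some i => (i : Int)
                  | none => -1) := by
  have hAne : A ≠ [] := by intro h; subst h; simp at hlen
  have hvals := counter_values A
  have hdset : d ∈ PySem.Set.ofList A := (PySem.Set.mem_ofList A d).mpr hdA
  have hmax : PySem.List.max? (PySem.Dict.counter A).values (fun v => v)
      = some ((A.count d : Nat) : Int) := by
    cases hm : PySem.List.max? (PySem.Dict.counter A).values (fun v => v) with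
    | none =>
      rw [PySem.List.max?_eq_none_iff, hvals, List.map_eq_nil_iff] at hm
      rw [hm] at hdset
      simp at hdset
    | some m =>
      have hmem := PySem.List.max?_mem hm
      have hismax := PySem.List.max?_isMax hm
      rw [hvals] at hmem
      obtain ⟨k₀, hk₀, hmk⟩ := List.mem_map.mp hmem
      have hdm : ((A.count d : Nat) : Int) ≤ m :=
        hismax _ (by rw [hvals]; exact List.mem_map.mpr ⟨d, hdset, rfl⟩)
      congr 1
      by_cases hkd : k₀ = d
      · subst hkd; omega
      · have := count_lt_of_dominator A d k₀ hd hkd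
        omega
  have h1 : ¬ ((A.length : Int) < 2) := by omega
  have h2 : ¬ (((A.count d : Nat) : Int) ≤ PySem.Int.floordiv (A.length : Int) 2) := by
    rw [PySem.Int.floordiv_eq_ediv_of_pos (by omega)]
    omega
  have hkeys : (PySem.Dict.counter A).keys = PySem.Set.ofList A := PySem.Dict.keys_counter A
  obtain ⟨tl, hfl⟩ : ∃ t, ((PySem.Dict.counter A).keys.filter
      (fun x => (PySem.Dict.counter A).getD x 0 == ((A.count d : Nat) : Int))) = d :: t := by
    rw [hkeys]
    apply filter_head_unique _ _ _ hdset
    intro x hx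
    rw [PySem.Dict.getD_counter, beq_iff_eq]
    constructor
    · intro h
      by_contra hxd
      have := count_lt_of_dominator A d x hd hxd
      omega
    · intro h; subst h; rfl
  simp only [solution, if_neg hAne, if_neg h1, hmax, if_neg h2, hfl]

-- A's value when no dominator exists and len(A) ≥ 2
theorem sol_of_no_dominator (A : List Int) (hlen : 2 ≤ A.length)
    (hnd : ∀ x, ¬ ((A.length : Int) < 2 * (A.count x : Int))) :
    solution A = -1 := by
  have hAne : A ≠ [] := by intro h; subst h; simp at hlen
  have h1 : ¬ ((A.length : Int) < 2) := by omega
  cases hm : PySem.List.max? (PySem.Dict.counter A).values (fun v => v) with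
  | none => simp only [solution, if_neg hAne, if_neg h1, hm]
  | some m =>
    have hmem := PySem.List.max?_mem hm
    rw [counter_values A] at hmem
    obtain ⟨k₀, hk₀, hmk⟩ := List.mem_map.mp hmem
    have h2 : m ≤ PySem.Int.floordiv (A.length : Int) 2 := by
      rw [PySem.Int.floordiv_eq_ediv_of_pos (by omega)]
      have := hnd k₀
      omega
    simp only [solution, if_neg hAne, if_neg h1, hm, if_pos h2]


theorem solution_spec : Claim_equal_solution := by
  unfold Claim_equal_solution
  intro A _
  unfold Spec_solution
  cases A with
  | nil => rfl
  | cons a t =>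
    cases t with
    | nil =>
      -- singleton list: A returns 0 outright, B elects the unique element
      show solution [a] = solution_alt [a]
      have h1 : solution [a] = 0 := by
        simp [solution]
      have h2 : solution_alt [a] = 0 := by
        simp [solution_alt, bmStep]
      rw [h1, h2]
    | cons b t =>
      have hlen : 2 ≤ (a :: b :: t).length := by simp
      by_cases hdom : ∃ d, d ∈ (a :: b :: t) ∧
          (((a :: b :: t).length : Nat) : Int) < 2 * (((a :: b :: t).count d : Nat) : Int)
      · obtain ⟨d, hdA, hd⟩ := hdom
        rw [sol_of_dominator _ hlen d hdA hd, alt_of_dominator _ a (b :: t) rfl d hd]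
      · push Not at hdom
        have hnd : ∀ x, ¬ ((((a :: b :: t).length : Nat) : Int) <
            2 * (((a :: b :: t).count x : Nat) : Int)) := by
          intro x hx
          by_cases hmem : x ∈ (a :: b :: t)
          · exact absurd hx (not_lt.mpr (hdom x hmem))
          · rw [List.count_eq_zero.mpr hmem] at hx
            simp at hx
            omega
        rw [sol_of_no_dominator _ hlen hnd,
            alt_of_no_dominator _ (fun x hx => hnd x hx)]
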